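-- pv_equiv track=rewrite | github.com/xiaoxiaoadai/niukeoj-hw | 蛇形矩阵.py | get_sublist
-- ===== SOURCE A (Python) =====
-- def get_sublist(num1, mylist1):
--     """
--     mylist = [1 ,2, 3, 4, num]
--     :param num1:
--     :return: 一个蛇形矩阵的第一行
--     """
--     # mylist = list(range(1, num1 + 1))
--     res1 = list()
--     idx = 0
--     i = 0
--     while idx < len(mylist1):
--         res1.append(mylist1[idx])
--         idx += (i+2)
--         i += 1
--     return res1
-- ===== SOURCE B (Python) =====
-- def get_sublist(num1, mylist1):
--     # Recurse on suffix slices: take the head, then drop a growing-size prefix.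
--     def go(lst, step):
--         if not lst:
--             return []
--         return [lst[0]] + go(lst[step:], step + 1)
--     return go(mylist1, 2)
-- ===== Notes on version B (the rewrite author's own statement) =====
-- stated objective: alternative
-- what changed: B does no index arithmetic at all: it recurses structurally on suffix slices of the list (emit the head, slice off a prefix whose size grows by one each level), whereas A iterates with two running index accumulators into the fixed list.
import Mathlib
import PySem

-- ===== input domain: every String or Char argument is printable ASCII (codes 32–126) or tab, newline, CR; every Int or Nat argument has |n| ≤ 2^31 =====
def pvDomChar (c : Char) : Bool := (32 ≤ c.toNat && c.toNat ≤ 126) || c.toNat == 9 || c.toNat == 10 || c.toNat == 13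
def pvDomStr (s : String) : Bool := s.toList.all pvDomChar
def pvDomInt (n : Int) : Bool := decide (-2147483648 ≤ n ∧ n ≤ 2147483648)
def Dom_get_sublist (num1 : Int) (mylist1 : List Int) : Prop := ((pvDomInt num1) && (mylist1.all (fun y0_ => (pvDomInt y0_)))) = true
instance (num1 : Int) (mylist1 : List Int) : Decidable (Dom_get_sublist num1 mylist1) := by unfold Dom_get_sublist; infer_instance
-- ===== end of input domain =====

-- B recurses on suffix slices (take head, drop a growing prefix) instead of A's index-accumulator loop; alternative decomposition, same cost.


-- ===== PORT A =====
-- A's while loop: state (idx, i); idx stays nonnegative in Python, so it is a Nat here.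
def getSublistLoopA (l : List Int) (idx i : Nat) (acc : List Int) : List Int :=
  if h : idx < l.length then
    getSublistLoopA l (idx + (i + 2)) (i + 1) (acc ++ [l[idx]])
  else acc
termination_by l.length - idx
decreasing_by omega

def get_sublist (num1 : Int) (mylist1 : List Int) : List Int :=
  getSublistLoopA mylist1 0 0 []

-- ===== PORT B =====
-- B's helper go: emit the head, recurse on the slice lst[step:] with step+1.
-- step starts at 2 and only grows, so lst[step:] is List.drop step (nonnegative slice, exact).
def getSublistGoB (lst : List Int) (step : Nat) : List Int :=
  match lst with
  | [] => []
  | x :: xs => x :: getSublistGoB ((x :: xs).drop (step + 2)) (step + 1)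
termination_by lst.length
decreasing_by simp

-- Python's step starts at 2; encoded here as step+2 with step starting at 0 so the
-- recursion terminates for every Nat argument (the prefix dropped is always ≥ 2).
def get_sublist_alt (num1 : Int) (mylist1 : List Int) : List Int :=
  getSublistGoB mylist1 0

-- ===== PRECONDITION & SPEC =====
def Spec_get_sublist (num1 : Int) (mylist1 : List Int) (out : List Int) : Prop := out = get_sublist_alt num1 mylist1
instance (num1 : Int) (mylist1 : List Int) (out : List Int) : Decidable (Spec_get_sublist num1 mylist1 out) := by unfold Spec_get_sublist; infer_instance

-- ===== CLAIM (what is proved, stated in full; the proofs are below) =====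
def Claim_equal_get_sublist : Prop := ∀ (num1 : Int) (mylist1 : List Int), Dom_get_sublist num1 mylist1 → Spec_get_sublist num1 mylist1 (get_sublist num1 mylist1)

-- ===== LEMMAS AND PROOFS =====
lemma goB_nil (i : Nat) : getSublistGoB [] i = [] := by
  rw [getSublistGoB.eq_def]

lemma goB_cons (x : Int) (xs : List Int) (i : Nat) :
    getSublistGoB (x :: xs) i = x :: getSublistGoB ((x :: xs).drop (i + 2)) (i + 1) := by
  rw [getSublistGoB.eq_def]

-- Invariant: A's loop with state (idx, i) computes acc ++ B's recursion on the suffix l.drop idx.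
lemma loopA_eq_goB (l : List Int) :
    ∀ (n idx i : Nat) (acc : List Int), l.length - idx ≤ n →
      getSublistLoopA l idx i acc = acc ++ getSublistGoB (l.drop idx) i := by
  intro n
  induction n with
  | zero =>
    intro idx i acc hn
    rw [getSublistLoopA, dif_neg (by omega)]
    rw [List.drop_eq_nil_of_le (by omega), goB_nil]
    simp
  | succ m ih =>
    intro idx i acc hn
    rw [getSublistLoopA]
    by_cases h : idx < l.length
    · rw [dif_pos h]
      have hd : l.drop idx = l[idx] :: l.drop (idx + 1) := List.drop_eq_getElem_cons h
      rw [ih (idx + (i + 2)) (i + 1) _ (by omega), hd, goB_cons]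
      have hdd : (l[idx] :: l.drop (idx + 1)).drop (i + 2) = l.drop (idx + (i + 2)) := by
        simp [List.drop_drop]
      rw [hdd]
      simp
    · rw [dif_neg h]
      rw [List.drop_eq_nil_of_le (by omega)]
      simp [getSublistGoB]

-- ===== VERDICT (by name: the statement is the Claim_ definition above) =====
theorem get_sublist_spec : Claim_equal_get_sublist := by
  intro num1 mylist1 _
  unfold Spec_get_sublist get_sublist get_sublist_alt
  simpa using loopA_eq_goB mylist1 mylist1.length 0 0 [] (by omega)
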